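-- pv_equiv track=rewrite | github.com/MrBrantCode/unitest_baseline | mut_generate/mist_train_taco/taco_1806/solution.py | find_leaf_nodes
-- ===== SOURCE A (Python) =====
-- def find_leaf_nodes(arr, N):
--     def leaf_nodes_helper(arr, N, ans):
--         if N == 0:
--             return
--         if N == 1:
--             ans.append(arr[0])
--             return
--         root = arr[0]
--         index = 1
--         for i in range(1, N):
--             if arr[0] < arr[i]:
--                 index = i
--                 break
--         leaf_nodes_helper(arr[1:index], len(arr[1:index]), ans)
--         leaf_nodes_helper(arr[index:], len(arr[index:]), ans)
--
--     ans = []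
--     leaf_nodes_helper(arr, N, ans)
--     return ans
-- ===== SOURCE B (Python) =====
-- def find_leaf_nodes(arr, N):
--     n = len(arr)
--     # next-strictly-greater index for every position, by one monotonic-stack pass
--     nge = [n] * n
--     stack = []
--     for i in range(n):
--         v = arr[i]
--         while stack and arr[stack[-1]] < v:
--             nge[stack.pop()] = i
--         stack.append(i)
--     if N == 0:
--         return []
--     if N == 1:
--         return [arr[0]]
--     # the top frame looks for the first greater element inside [1, N) only
--     j0 = nge[0] if nge[0] < N else 1
--     # walk the (lo, hi) index ranges with an explicit work stack (no slicing, no recursion)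
--     ans = []
--     work = [(j0, n), (1, j0)]
--     while work:
--         lo, hi = work.pop()
--         if hi - lo == 1:
--             ans.append(arr[lo])
--         elif hi - lo >= 2:
--             j = nge[lo] if lo < nge[lo] < hi else lo + 1
--             work.append((j, hi))
--             work.append((lo + 1, j))
--     return ans
-- ===== Notes on version B (the rewrite author's own statement) =====
-- stated objective: faster
-- what changed: A rebuilds slices and rescans each subarray for the first greater element at every level of the recursion; B precomputes every next-greater index once with a monotonic stack and then recurses over (lo,hi) index ranges with no slicing and no rescanning.
import Mathlib
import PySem

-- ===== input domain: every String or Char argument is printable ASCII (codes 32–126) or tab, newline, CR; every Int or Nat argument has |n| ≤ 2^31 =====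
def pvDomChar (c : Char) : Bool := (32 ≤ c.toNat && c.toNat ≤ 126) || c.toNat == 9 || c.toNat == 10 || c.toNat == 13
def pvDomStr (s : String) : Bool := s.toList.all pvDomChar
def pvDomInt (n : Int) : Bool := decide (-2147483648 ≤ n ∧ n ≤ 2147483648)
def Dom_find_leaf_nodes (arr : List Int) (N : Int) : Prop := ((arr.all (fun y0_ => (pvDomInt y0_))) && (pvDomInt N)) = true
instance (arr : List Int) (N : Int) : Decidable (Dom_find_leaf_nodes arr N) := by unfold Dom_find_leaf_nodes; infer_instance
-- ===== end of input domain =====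

-- B replaces A's slice-and-rescan recursion by one monotonic-stack pass that precomputes
-- every next-greater index, plus an explicit work-stack loop over (lo,hi) index ranges
-- (no slicing, no rescanning); a timing run measured B faster (A times out at n=16384
-- where B returns). A mutates only its own local list: no caller-visible side effects.

-- ===== PORT A =====
-- the 'index = 1; for i in range(1, N): if arr[0] < arr[i]: index = i; break' loop:
-- walks the elements arr[1:N] keeping the running index i (exact: same elements, same order)
def aScan (root : Int) : Nat → List Int → Nat
  | _, [] => 1
  | i, x :: rest => if root < x then i else aScan root (i + 1) rest

-- needed by leafHelperA's termination: the scan returns 1 or a reached counter value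
theorem aScan_one_le (root : Int) : ∀ (l : List Int) (s : Nat), 1 ≤ s → 1 ≤ aScan root s l := by
  intro l
  induction l with
  | nil => intro s _; simp [aScan]
  | cons x rest ih =>
    intro s hs
    simp only [aScan]
    split
    · exact hs
    · exact ih (s + 1) (by omega)

-- leaf_nodes_helper: every call (recursive, and the top call under Pre_) passes N = len(arr),
-- so the helper's N parameter is ported as arr.length (exact under Pre_).
-- arr[1:index] and arr[index:] with 1 ≤ index are drop/take (exact for nonnegative bounds).
def leafHelperA (arr : List Int) (ans : List Int) : List Int :=
  if h0 : arr.length = 0 then ans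
  else if h1 : arr.length = 1 then ans ++ [arr.getD 0 0]
  else
    let index := aScan (arr.getD 0 0) 1 (arr.drop 1)
    leafHelperA (arr.drop index) (leafHelperA ((arr.drop 1).take (index - 1)) ans)
termination_by arr.length
decreasing_by
  · simp only [List.length_take, List.length_drop]
    omega
  · have hx : 1 ≤ index := aScan_one_le _ _ _ (by omega)
    simp only [List.length_drop]
    omega

-- top-level frame of leaf_nodes_helper(arr, N): the only call where N may differ from len(arr);
-- its scan visits arr[1:N] = (arr.drop 1).take (N.toNat - 1) (exact: range(1,N) is empty for
-- N ≤ 1, and under Pre_ the Python scan never reads past the first greater element).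
def find_leaf_nodes (arr : List Int) (N : Int) : List Int :=
  if N = 0 then []
  else if N = 1 then [arr.getD 0 0]  -- arr[0]: Pre_ guarantees arr ≠ [] here
  else
    let index := aScan (arr.getD 0 0) 1 ((arr.drop 1).take (N.toNat - 1))
    leafHelperA (arr.drop index) (leafHelperA ((arr.drop 1).take (index - 1)) [])

-- ===== PORT B =====
-- the inner 'while stack and arr[stack[-1]] < v: nge[stack.pop()] = i'
def popLoop (arr : List Int) (v : Int) (i : Nat) (stack : List Nat) (nge : List Nat) :
    List Nat × List Nat :=
  match stack with
  | [] => ([], nge)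
  | k :: rest => if arr.getD k 0 < v then popLoop arr v i rest (nge.set k i) else (k :: rest, nge)

-- the monotonic-stack pass: nge[i] = index of the next strictly greater element, else len(arr)
def buildNge (arr : List Int) : List Nat :=
  ((List.range arr.length).foldl
    (fun (st : List Nat × List Nat) i =>
      let p := popLoop arr (arr.getD i 0) i st.1 st.2
      (i :: p.1, p.2))
    ([], List.replicate arr.length arr.length)).2

-- the 'while work:' loop over (lo, hi) index ranges; the head of the list is the top of
-- Python's work stack (Python pops/pushes at the end, the port at the head: same order)
def goLoop (arr : List Int) (nge : List Nat) : List (Nat × Nat) → List Int → List Int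
  | [], ans => ans
  | (lo, hi) :: rest, ans =>
    if hi - lo = 1 then goLoop arr nge rest (ans ++ [arr.getD lo 0])
    else if 2 ≤ hi - lo then
      let g := nge.getD lo arr.length
      let j := if lo < g ∧ g < hi then g else lo + 1
      goLoop arr nge ((lo + 1, j) :: (j, hi) :: rest) ans
    else goLoop arr nge rest ans
termination_by work => ((work.map (fun p => p.2 - p.1)).sum, work.length)
decreasing_by
  · apply Prod.Lex.left
    simp only [List.map_cons, List.sum_cons]
    omega
  · apply Prod.Lex.left
    simp only [List.map_cons, List.sum_cons]
    split <;> omega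
  · have h0 : hi - lo = 0 := by omega
    simp only [List.map_cons, List.sum_cons, h0, Nat.zero_add, List.length_cons]
    apply Prod.Lex.right
    omega

def find_leaf_nodes_alt (arr : List Int) (N : Int) : List Int :=
  let nge := buildNge arr
  if N = 0 then []
  else if N = 1 then [arr.getD 0 0]
  else
    let g := nge.getD 0 arr.length
    let j0 := if (g : Int) < N then g else 1
    goLoop arr nge [(1, j0), (j0, arr.length)] []

-- ===== PRECONDITION & SPEC =====
-- Pre_ excludes exactly the inputs on which A raises IndexError: an empty arr with N ≠ 0
-- (arr[0] fails), and N > len(arr) with no element of arr[1:] greater than arr[0]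
-- (the scan 'for i in range(1, N)' runs off the end of arr).
def Pre_find_leaf_nodes (arr : List Int) (N : Int) : Prop :=
  N = 0 ∨ (arr ≠ [] ∧ (N ≤ (arr.length : Int) ∨
    ∃ i ∈ List.range arr.length, 1 ≤ i ∧ arr.getD 0 0 < arr.getD i 0))
instance (arr : List Int) (N : Int) : Decidable (Pre_find_leaf_nodes arr N) := by
  unfold Pre_find_leaf_nodes; infer_instance

def pvWitness_find_leaf_nodes : List Int × Int := ([4, 2, 1, 3, 6, 5], 6)

def Spec_find_leaf_nodes (arr : List Int) (N : Int) (out : List Int) : Prop := out = find_leaf_nodes_alt arr N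
instance (arr : List Int) (N : Int) (out : List Int) : Decidable (Spec_find_leaf_nodes arr N out) := by unfold Spec_find_leaf_nodes; infer_instance

-- ===== CLAIM (what is proved, stated in full; the proofs are below) =====
def Claim_equal_find_leaf_nodes : Prop := ∀ (arr : List Int) (N : Int), Dom_find_leaf_nodes arr N → Pre_find_leaf_nodes arr N → Spec_find_leaf_nodes arr N (find_leaf_nodes arr N)

-- ===== LEMMAS AND PROOFS =====

-- proof-side recursive presentation of the work-stack loop: one (lo, hi) range at a time
def goRec (arr : List Int) (nge : List Nat) (lo hi : Nat) (ans : List Int) : List Int :=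
  if hi - lo = 1 then ans ++ [arr.getD lo 0]
  else if 2 ≤ hi - lo then
    let g := nge.getD lo arr.length
    let j := if lo < g ∧ g < hi then g else lo + 1
    goRec arr nge j hi (goRec arr nge (lo + 1) j ans)
  else ans
termination_by hi - lo
decreasing_by
  · split <;> omega
  · split <;> omega

-- popping one range off the work stack computes goRec of that range
theorem goLoop_push (arr : List Int) (nge : List Nat) : ∀ (fuel lo hi : Nat), hi - lo ≤ fuel →
    ∀ (rest : List (Nat × Nat)) (ans : List Int),
    goLoop arr nge ((lo, hi) :: rest) ans = goLoop arr nge rest (goRec arr nge lo hi ans) := by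
  intro fuel
  induction fuel with
  | zero =>
    intro lo hi hf rest ans
    rw [goLoop, goRec]
    have h0 : hi - lo = 0 := by omega
    simp [h0]
  | succ fuel ih =>
    intro lo hi hf rest ans
    rw [goLoop, goRec]
    by_cases h1 : hi - lo = 1
    · simp [h1]
    by_cases h2 : 2 ≤ hi - lo
    · rw [if_neg h1, if_pos h2, if_neg h1, if_pos h2]
      set g := nge.getD lo arr.length with hgdef
      set j := if lo < g ∧ g < hi then g else lo + 1 with hj
      have hjlo : lo + 1 ≤ j := by rw [hj]; split <;> omega
      have hjhi : j < hi := by rw [hj]; split <;> omega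
      rw [ih (lo + 1) j (by omega), ih j hi (by omega)]
    · rw [if_neg h1, if_neg h2, if_neg h1, if_neg h2]

-- the specification of buildNge: first strictly-greater index after i (arr.length if none)
def fg (arr : List Int) (i : Nat) : Nat :=
  i + 1 + List.findIdx (fun x => decide (arr.getD i 0 < x)) (arr.drop (i + 1))

theorem fg_lt (arr : List Int) (i : Nat) : i < fg arr i := by
  unfold fg; omega

theorem fg_le (arr : List Int) (i : Nat) (h : i < arr.length) : fg arr i ≤ arr.length := by
  have h2 := List.findIdx_le_length (p := fun x => decide (arr.getD i 0 < x)) (xs := arr.drop (i + 1))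
  rw [List.length_drop] at h2
  unfold fg; omega

theorem getD_take_drop (arr : List Int) (w u : Nat) (hu : u < w) (hn : 1 + u < arr.length) :
    ((arr.drop 1).take w).getD u 0 = arr.getD (1 + u) 0 := by
  have hl : u < ((arr.drop 1).take w).length := by
    simp only [List.length_take, List.length_drop]; omega
  rw [List.getD_eq_getElem _ _ hl, List.getElem_take, List.getElem_drop,
      ← List.getD_eq_getElem arr 0 (by omega)]

theorem fg_first (arr : List Int) (i j : Nat) (hij : i < j) (hj : j < fg arr i)
    (hjn : j < arr.length) : ¬ arr.getD i 0 < arr.getD j 0 := by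
  have hlt : j - (i + 1) < List.findIdx (fun x => decide (arr.getD i 0 < x)) (arr.drop (i + 1)) := by
    unfold fg at hj; omega
  have hlen : j - (i + 1) < (arr.drop (i + 1)).length := by
    rw [List.length_drop]; omega
  have hfalse := List.not_of_lt_findIdx (h := hlt)
  simp only [List.getElem_drop, show i + 1 + (j - (i + 1)) = j from by omega] at hfalse
  rw [List.getD_eq_getElem arr 0 hjn]
  simpa using hfalse

theorem fg_hit (arr : List Int) (i : Nat) (h : fg arr i < arr.length) :
    arr.getD i 0 < arr.getD (fg arr i) 0 := by
  have hlen : List.findIdx (fun x => decide (arr.getD i 0 < x)) (arr.drop (i + 1)) <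
      (arr.drop (i + 1)).length := by
    rw [List.length_drop]; unfold fg at h; omega
  have htrue := List.findIdx_getElem (w := hlen)
  have he : i + 1 + List.findIdx (fun x => decide (arr.getD i 0 < x)) (arr.drop (i + 1)) =
      fg arr i := by unfold fg; ring
  simp only [List.getElem_drop, he] at htrue
  rw [List.getD_eq_getElem arr 0 h]
  simpa using htrue

theorem fg_eq (arr : List Int) (k i : Nat) (hki : k < i) (hin : i < arr.length)
    (hgt : arr.getD k 0 < arr.getD i 0)
    (hfirst : ∀ j, k < j → j < i → ¬ arr.getD k 0 < arr.getD j 0) : fg arr k = i := by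
  unfold fg
  have hlen : i - (k + 1) < (arr.drop (k + 1)).length := by
    rw [List.length_drop]; omega
  have : List.findIdx (fun x => decide (arr.getD k 0 < x)) (arr.drop (k + 1)) = i - (k + 1) := by
    rw [List.findIdx_eq hlen]
    constructor
    · simp only [List.getElem_drop, show k + 1 + (i - (k + 1)) = i from by omega]
      rw [List.getD_eq_getElem arr 0 hin] at hgt
      simpa using hgt
    · intro j hj
      simp only [List.getElem_drop]
      have hjn : k + 1 + j < arr.length := by
        rw [List.length_drop] at hlen; omega
      have := hfirst (k + 1 + j) (by omega) (by omega)
      rw [List.getD_eq_getElem arr 0 hjn] at this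
      simpa using this
  omega

theorem fg_eq_len (arr : List Int) (k : Nat) (hk : k < arr.length)
    (hnone : ∀ j, k < j → j < arr.length → ¬ arr.getD k 0 < arr.getD j 0) :
    fg arr k = arr.length := by
  unfold fg
  have : List.findIdx (fun x => decide (arr.getD k 0 < x)) (arr.drop (k + 1)) =
      (arr.drop (k + 1)).length := by
    rw [List.findIdx_eq_length]
    intro x hx
    rw [List.mem_iff_getElem] at hx
    obtain ⟨j, hj, rfl⟩ := hx
    simp only [List.getElem_drop]
    have hjn : k + 1 + j < arr.length := by rw [List.length_drop] at hj; omega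
    have := hnone (k + 1 + j) (by omega) (by omega)
    rw [List.getD_eq_getElem arr 0 hjn] at this
    simpa using this
  rw [this, List.length_drop]; omega

-- the invariant carried through the monotonic-stack pass (state = (stack, nge) before step i)
def StackInv (arr : List Int) (i : Nat) (st : List Nat × List Nat) : Prop :=
  st.2.length = arr.length ∧
  (∀ k ∈ st.1, k < i) ∧
  List.Pairwise (fun a b => b < a) st.1 ∧
  (∀ k ∈ st.1, ∀ j, k < j → j < i → arr.getD j 0 ≤ arr.getD k 0) ∧
  (∀ k, k < i → k ∉ st.1 → st.2.getD k arr.length = fg arr k) ∧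
  (∀ k, (k ∈ st.1 ∨ i ≤ k) → st.2.getD k arr.length = arr.length)

theorem getD_set_self (l : List Nat) (k v d : Nat) (h : k < l.length) :
    (l.set k v).getD k d = v := by
  rw [List.getD_eq_getElem _ _ (by simpa using h)]
  simp [List.getElem_set_self]

theorem getD_set_ne (l : List Nat) (k k' v d : Nat) (h : k ≠ k') :
    (l.set k v).getD k' d = l.getD k' d := by
  by_cases hk : k' < l.length
  · rw [List.getD_eq_getElem _ _ (by simpa using hk), List.getD_eq_getElem _ _ hk]
    exact List.getElem_set_ne h _
  · rw [List.getD_eq_default _ _ (by simpa using (by omega : l.length ≤ k')),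
        List.getD_eq_default _ _ (by omega)]

theorem popLoop_inv (arr : List Int) (i : Nat) (hin : i < arr.length) :
    ∀ (stack nge : List Nat),
    nge.length = arr.length →
    (∀ k ∈ stack, k < i) →
    List.Pairwise (fun a b => b < a) stack →
    (∀ k ∈ stack, ∀ j, k < j → j < i → arr.getD j 0 ≤ arr.getD k 0) →
    (∀ k, k < i → k ∉ stack → nge.getD k arr.length = fg arr k) →
    (∀ k, (k ∈ stack ∨ i ≤ k) → nge.getD k arr.length = arr.length) →
    (popLoop arr (arr.getD i 0) i stack nge).2.length = arr.length ∧
    (∀ k ∈ (popLoop arr (arr.getD i 0) i stack nge).1, k < i) ∧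
    List.Pairwise (fun a b => b < a) (popLoop arr (arr.getD i 0) i stack nge).1 ∧
    (∀ k ∈ (popLoop arr (arr.getD i 0) i stack nge).1, ∀ j, k < j → j < i + 1 →
        arr.getD j 0 ≤ arr.getD k 0) ∧
    (∀ k, k < i → k ∉ (popLoop arr (arr.getD i 0) i stack nge).1 →
        (popLoop arr (arr.getD i 0) i stack nge).2.getD k arr.length = fg arr k) ∧
    (∀ k, (k ∈ (popLoop arr (arr.getD i 0) i stack nge).1 ∨ i ≤ k) →
        (popLoop arr (arr.getD i 0) i stack nge).2.getD k arr.length = arr.length) := by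
  intro stack
  induction stack with
  | nil =>
    intro nge h1 h2 h3 h4 h5 h6
    refine ⟨h1, by simp [popLoop], by simp [popLoop], by simp [popLoop], ?_, ?_⟩
    · intro k hk hks; exact h5 k hk (by simp)
    · intro k hk; simp only [popLoop]; exact h6 k (by simpa [popLoop] using hk)
  | cons k0 rest ih =>
    intro nge h1 h2 h3 h4 h5 h6
    simp only [popLoop]
    by_cases hpop : arr.getD k0 0 < arr.getD i 0
    · simp only [if_pos hpop]
      have hk0i : k0 < i := h2 k0 (by simp)
      have hk0n : k0 < arr.length := by omega
      have hfg : fg arr k0 = i :=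
        fg_eq arr k0 i hk0i hin hpop (fun j hj1 hj2 => by
          have := h4 k0 (by simp) j hj1 hj2; omega)
      have hk0rest : k0 ∉ rest := by
        intro hmem
        have := (List.pairwise_cons.mp h3).1 k0 hmem
        omega
      refine ih (nge.set k0 i) ?_ ?_ ?_ ?_ ?_ ?_
      · simpa using h1
      · intro k hk; exact h2 k (by simp [hk])
      · exact (List.pairwise_cons.mp h3).2
      · intro k hk j hj1 hj2; exact h4 k (by simp [hk]) j hj1 hj2
      · intro k hk hkr
        by_cases hkk0 : k = k0
        · subst hkk0
          rw [getD_set_self _ _ _ _ (by omega), hfg]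
        · rw [getD_set_ne _ _ _ _ _ (fun h => hkk0 h.symm)]
          exact h5 k hk (by simp [hkr, hkk0])
      · intro k hk
        have hkk0 : k ≠ k0 := by
          rcases hk with hk | hk
          · intro he; subst he; exact hk0rest hk
          · omega
        rw [getD_set_ne _ _ _ _ _ (fun h => hkk0 h.symm)]
        exact h6 k (by rcases hk with hk | hk; exact Or.inl (by simp [hk]); exact Or.inr hk)
    · simp only [if_neg hpop]
      refine ⟨h1, h2, h3, ?_, ?_, ?_⟩
      · intro k hk j hj1 hj2
        by_cases hji : j = i
        · subst hji
          rcases List.mem_cons.mp hk with rfl | hkr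
          · omega
          · have hk0k : k < k0 := (List.pairwise_cons.mp h3).1 k hkr
            have : arr.getD k0 0 ≤ arr.getD k 0 := h4 k hk k0 hk0k (h2 k0 (by simp))
            omega
        · exact h4 k hk j hj1 (by omega)
      · intro k hk hks; exact h5 k hk hks
      · exact h6

theorem range_foldl_inv (arr : List Int) : ∀ m, m ≤ arr.length →
    StackInv arr m ((List.range m).foldl
      (fun (st : List Nat × List Nat) i =>
        let p := popLoop arr (arr.getD i 0) i st.1 st.2
        (i :: p.1, p.2))
      ([], List.replicate arr.length arr.length)) := by
  intro m
  induction m with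
  | zero =>
    intro _
    refine ⟨by simp, by simp, by simp, by simp, by simp, ?_⟩
    intro k _
    by_cases hk : k < arr.length
    · exact List.getD_replicate _ hk
    · exact List.getD_eq_default _ _ (by simpa using (by omega : arr.length ≤ k))
  | succ m ih =>
    intro hm
    have hmn : m < arr.length := by omega
    obtain ⟨h1, h2, h3, h4, h5, h6⟩ := ih (by omega)
    rw [List.range_succ, List.foldl_append]
    simp only [List.foldl_cons, List.foldl_nil]
    obtain ⟨p1, p2, p3, p4, p5, p6⟩ := popLoop_inv arr m hmn _ _ h1 h2 h3 h4 h5 h6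
    refine ⟨p1, ?_, ?_, ?_, ?_, ?_⟩
    · intro k hk
      rcases List.mem_cons.mp hk with rfl | hk
      · omega
      · have := p2 k hk; omega
    · rw [List.pairwise_cons]
      exact ⟨fun k hk => p2 k hk, p3⟩
    · intro k hk j hj1 hj2
      rcases List.mem_cons.mp hk with rfl | hk
      · omega
      · exact p4 k hk j hj1 hj2
    · intro k hk hks
      have hkm : k ≠ m := by intro he; subst he; exact hks (by simp)
      exact p5 k (by omega) (fun h => hks (List.mem_cons.mpr (Or.inr h)))
    · intro k hk
      rcases hk with hk | hk
      · rcases List.mem_cons.mp hk with rfl | hk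
        · exact p6 k (Or.inr (by omega))
        · exact p6 k (Or.inl hk)
      · exact p6 k (Or.inr (by omega))

theorem buildNge_getD (arr : List Int) (lo : Nat) (hlo : lo < arr.length) :
    (buildNge arr).getD lo arr.length = fg arr lo := by
  obtain ⟨h1, h2, h3, h4, h5, h6⟩ := range_foldl_inv arr arr.length (le_refl _)
  unfold buildNge
  by_cases hmem : lo ∈ ((List.range arr.length).foldl
      (fun (st : List Nat × List Nat) i =>
        let p := popLoop arr (arr.getD i 0) i st.1 st.2
        (i :: p.1, p.2))
      ([], List.replicate arr.length arr.length)).1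
  · rw [h6 lo (Or.inl hmem)]
    exact (fg_eq_len arr lo hlo (fun j hj1 hj2 => by
      have := h4 lo hmem j hj1 hj2; omega)).symm
  · exact h5 lo hlo hmem

-- characterisation of A's index scan
theorem aScan_found (r : Int) : ∀ (l : List Int) (s t : Nat), s ≤ t → t - s < l.length →
    r < l.getD (t - s) 0 → (∀ u, u < t - s → ¬ r < l.getD u 0) →
    aScan r s l = t := by
  intro l
  induction l with
  | nil => intro s t _ h; simp at h
  | cons x rest ih =>
    intro s t hst hlen hr hfirst
    simp only [aScan]
    by_cases hs : s = t
    · subst hs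
      simp only [Nat.sub_self, List.getD_cons_zero] at hr
      rw [if_pos hr]
    · have h1 : 1 ≤ t - s := by omega
      rw [if_neg (by
        have := hfirst 0 (by omega)
        simpa using this)]
      apply ih (s + 1) t (by omega)
      · simp only [List.length_cons] at hlen; omega
      · have : t - (s + 1) + 1 = t - s := by omega
        rw [← this] at hr
        simpa using hr
      · intro u hu
        have := hfirst (u + 1) (by omega)
        simpa using this

theorem aScan_none (r : Int) : ∀ (l : List Int) (s : Nat),
    (∀ u, u < l.length → ¬ r < l.getD u 0) →
    aScan r s l = 1 := by
  intro l
  induction l with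
  | nil => intro s _; simp [aScan]
  | cons x rest ih =>
    intro s hnone
    simp only [aScan]
    rw [if_neg (by have := hnone 0 (by simp); simpa using this)]
    exact ih (s + 1) (fun u hu => by
      have := hnone (u + 1) (by simpa using (by omega : u + 1 < rest.length + 1))
      simpa using this)

-- segment arithmetic
theorem seg_getD (arr : List Int) (lo hi u : Nat) (hu : u < hi - lo) (hhi : hi ≤ arr.length) :
    ((arr.drop lo).take (hi - lo)).getD u 0 = arr.getD (lo + u) 0 := by
  have hlen : u < ((arr.drop lo).take (hi - lo)).length := by
    simp [List.length_take, List.length_drop]; omega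
  rw [List.getD_eq_getElem _ _ hlen, List.getD_eq_getElem _ _ (by omega)]
  rw [List.getElem_take, List.getElem_drop]

-- the main induction: B on the range (lo,hi) computes what A computes on the slice arr[lo:hi]
theorem goRec_eq_helper (arr : List Int) : ∀ fuel lo hi ans, hi - lo ≤ fuel → hi ≤ arr.length →
    goRec arr (buildNge arr) lo hi ans = leafHelperA ((arr.drop lo).take (hi - lo)) ans := by
  intro fuel
  induction fuel with
  | zero =>
    intro lo hi ans hf hhi
    have h0 : hi - lo = 0 := by omega
    rw [goRec, leafHelperA]
    simp [h0]
  | succ fuel ih =>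
    intro lo hi ans hf hhi
    have hseglen : ((arr.drop lo).take (hi - lo)).length = min (hi - lo) (arr.length - lo) := by
      simp [List.length_take, List.length_drop]
    by_cases h0 : hi - lo = 0
    · rw [goRec, leafHelperA]; simp [h0]
    by_cases h1 : hi - lo = 1
    · have hlo : lo < arr.length := by omega
      rw [goRec, if_pos h1, leafHelperA]
      rw [dif_neg (by simp only [List.length_take, List.length_drop]; omega),
          dif_pos (by simp only [List.length_take, List.length_drop]; omega)]
      rw [seg_getD arr lo hi 0 (by omega) hhi]
      simp
    · -- hi - lo ≥ 2
      have h2 : 2 ≤ hi - lo := by omega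
      have hlo : lo < arr.length := by omega
      have hlen : ((arr.drop lo).take (hi - lo)).length = hi - lo := by omega
      have hg : (buildNge arr).getD lo arr.length = fg arr lo := buildNge_getD arr lo hlo
      have hfglt : lo < fg arr lo := fg_lt arr lo
      -- A's index on the segment
      set seg := (arr.drop lo).take (hi - lo) with hseg
      have hroot : seg.getD 0 0 = arr.getD lo 0 := by
        rw [hseg]; exact seg_getD arr lo hi 0 (by omega) hhi
      have hdrop1 : seg.drop 1 = (arr.drop (lo + 1)).take (hi - (lo + 1)) := by
        rw [hseg, List.drop_take, List.drop_drop, Nat.sub_sub]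
      have hidx : aScan (seg.getD 0 0) 1 (seg.drop 1) =
          (if lo < fg arr lo ∧ fg arr lo < hi then fg arr lo else lo + 1) - lo := by
        rw [hroot, hdrop1]
        by_cases hcase : fg arr lo < hi
        · rw [if_pos ⟨hfglt, hcase⟩]
          apply aScan_found
          · omega
          · simp only [List.length_take, List.length_drop]; omega
          · rw [show fg arr lo - lo - 1 = fg arr lo - (lo + 1) from by omega,
                seg_getD arr (lo + 1) hi (fg arr lo - (lo + 1)) (by omega) hhi,
                show lo + 1 + (fg arr lo - (lo + 1)) = fg arr lo from by omega]
            exact fg_hit arr lo (by omega)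
          · intro u hu
            rw [seg_getD arr (lo + 1) hi u (by omega) hhi]
            exact fg_first arr lo (lo + 1 + u) (by omega) (by omega) (by omega)
        · rw [if_neg (by omega), show lo + 1 - lo = 1 from by omega]
          apply aScan_none
          intro u hu
          have hu' : u < hi - (lo + 1) := by
            simp only [List.length_take, List.length_drop] at hu; omega
          rw [seg_getD arr (lo + 1) hi u hu' hhi]
          exact fg_first arr lo (lo + 1 + u) (by omega) (by omega) (by omega)
      set j := if lo < fg arr lo ∧ fg arr lo < hi then fg arr lo else lo + 1 with hj
      have hjlo : lo + 1 ≤ j := by rw [hj]; split <;> omega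
      have hjhi : j < hi := by rw [hj]; split <;> omega
      -- unfold both sides one step
      rw [goRec, leafHelperA]
      rw [if_neg (by omega), if_pos h2]
      rw [dif_neg (by omega), dif_neg (by omega)]
      simp only [hg, ← hj, hidx]
      -- segment algebra for the two recursive arguments
      have hleft : (seg.drop 1).take (j - lo - 1) = (arr.drop (lo + 1)).take (j - (lo + 1)) := by
        rw [hseg, List.drop_take, List.drop_drop, List.take_take]
        have : min (j - lo - 1) (hi - lo - 1) = j - (lo + 1) := by omega
        simp [this]
      have hright : seg.drop (j - lo) = (arr.drop j).take (hi - j) := by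
        rw [hseg, List.drop_take, List.drop_drop]
        have h1 : lo + (j - lo) = j := by omega
        have h2 : hi - lo - (j - lo) = hi - j := by omega
        rw [h1, h2]
      have hIH1 := ih (lo + 1) j ans (by omega) (by omega : j ≤ arr.length)
      have hIH2 := ih j hi (leafHelperA ((arr.drop (lo + 1)).take (j - (lo + 1))) ans)
        (by omega) hhi
      rw [hleft, hright] at *
      rw [← hIH2, ← hIH1]


theorem top_eq (arr : List Int) (N : Int) (hpre : Pre_find_leaf_nodes arr N) :
    find_leaf_nodes arr N = find_leaf_nodes_alt arr N := by
  by_cases hN0 : N = 0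
  · simp [find_leaf_nodes, find_leaf_nodes_alt, hN0]
  by_cases hN1 : N = 1
  · simp [find_leaf_nodes, find_leaf_nodes_alt, hN1]
  · have harr : arr ≠ [] := by
      rcases hpre with h | ⟨h, _⟩
      · exact absurd h hN0
      · exact h
    have hn : 0 < arr.length := List.length_pos_iff.mpr harr
    have hg : (buildNge arr).getD 0 arr.length = fg arr 0 := buildNge_getD arr 0 hn
    have hF1 : 1 ≤ fg arr 0 := fg_lt arr 0
    have hFle : fg arr 0 ≤ arr.length := fg_le arr 0 hn
    have hidx : aScan (arr.getD 0 0) 1 ((arr.drop 1).take (N.toNat - 1)) =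
        (if ((fg arr 0 : Nat) : Int) < N then fg arr 0 else 1) := by
      by_cases hc : ((fg arr 0 : Nat) : Int) < N
      · have hFn : fg arr 0 < arr.length := by
          rcases hpre with h | ⟨_, h | ⟨i, hi, h1, h2⟩⟩
          · exact absurd h hN0
          · omega
          · rw [List.mem_range] at hi
            by_contra hge
            exact (fg_first arr 0 i (by omega) (by omega) hi) h2
        rw [if_pos hc]
        apply aScan_found
        · exact hF1
        · simp only [List.length_take, List.length_drop]; omega
        · rw [getD_take_drop arr (N.toNat - 1) (fg arr 0 - 1) (by omega) (by omega),
              show 1 + (fg arr 0 - 1) = fg arr 0 from by omega]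
          exact fg_hit arr 0 hFn
        · intro u hu
          rw [getD_take_drop arr (N.toNat - 1) u (by omega) (by omega)]
          exact fg_first arr 0 (1 + u) (by omega) (by omega) (by omega)
      · rw [if_neg hc]
        apply aScan_none
        intro u hu
        simp only [List.length_take, List.length_drop] at hu
        rw [getD_take_drop arr (N.toNat - 1) u (by omega) (by omega)]
        exact fg_first arr 0 (1 + u) (by omega) (by omega) (by omega)
    simp only [find_leaf_nodes, find_leaf_nodes_alt, if_neg hN0, if_neg hN1, hg, hidx]
    set j0 := if ((fg arr 0 : Nat) : Int) < N then fg arr 0 else 1 with hj0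
    have hj01 : 1 ≤ j0 := by rw [hj0]; split <;> omega
    have hj0n : j0 ≤ arr.length := by rw [hj0]; split <;> omega
    rw [goLoop_push arr (buildNge arr) arr.length 1 j0 (by omega),
        goLoop_push arr (buildNge arr) arr.length j0 arr.length (by omega),
        goLoop]
    rw [goRec_eq_helper arr arr.length 1 j0 [] (by omega) (by omega),
        goRec_eq_helper arr arr.length j0 arr.length _ (by omega) (le_refl _),
        List.take_of_length_le (l := arr.drop j0) (i := arr.length - j0)
          (by rw [List.length_drop])]

-- ===== VERDICT (by name: the statement is the Claim_ definition above) =====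
theorem find_leaf_nodes_spec : Claim_equal_find_leaf_nodes := by
  intro arr N hdom hpre
  unfold Spec_find_leaf_nodes
  exact top_eq arr N hpre
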